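-- pv_equiv track=rewrite | github.com/gunwanth/Safechat_Intelligent_Messaging_System | app.py | _confusion_from_binary
-- ===== SOURCE A (Python) =====
-- def _confusion_from_binary(y_true, y_pred):
--     tp = fp = tn = fn = 0
--     for truth, pred in zip(y_true, y_pred):
--         truth = int(truth)
--         pred = int(pred)
--         if truth == 1 and pred == 1:
--             tp += 1
--         elif truth == 0 and pred == 1:
--             fp += 1
--         elif truth == 0 and pred == 0:
--             tn += 1
--         else:
--             fn += 1
--     return {"tp": tp, "fp": fp, "tn": tn, "fn": fn}
-- ===== SOURCE B (Python) =====
-- def _confusion_from_binary(y_true, y_pred):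
--     pairs = [(int(truth), int(pred)) for truth, pred in zip(y_true, y_pred)]
--     tp = pairs.count((1, 1))
--     fp = pairs.count((0, 1))
--     tn = pairs.count((0, 0))
--     return {"tp": tp, "fp": fp, "tn": tn, "fn": len(pairs) - tp - fp - tn}
-- ===== Notes on version B (the rewrite author's own statement) =====
-- stated objective: alternative
-- what changed: Replaces A's single-pass four-way branch with staged passes: materialise the (int(truth), int(pred)) pair list once, obtain tp/fp/tn by three whole-list count() calls, and derive fn by subtraction from the pair count, preserving the catch-all else.
import Mathlib
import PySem

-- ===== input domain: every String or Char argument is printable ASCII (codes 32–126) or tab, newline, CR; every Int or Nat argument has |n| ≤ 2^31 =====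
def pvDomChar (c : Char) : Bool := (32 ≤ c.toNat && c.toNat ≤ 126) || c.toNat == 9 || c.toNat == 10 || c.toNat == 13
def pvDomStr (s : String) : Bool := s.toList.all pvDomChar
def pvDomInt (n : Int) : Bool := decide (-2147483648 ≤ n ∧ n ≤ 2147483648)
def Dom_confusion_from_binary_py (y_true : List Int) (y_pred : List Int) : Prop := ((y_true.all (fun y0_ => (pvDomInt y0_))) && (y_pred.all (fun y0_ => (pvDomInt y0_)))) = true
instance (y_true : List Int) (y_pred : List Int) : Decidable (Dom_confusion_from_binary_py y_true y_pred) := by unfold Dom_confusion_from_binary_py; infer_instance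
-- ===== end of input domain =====

-- B restructures A's single-pass four-way branch into staged passes: build the pair list
-- once, count (1,1)/(0,1)/(0,0) by whole-list counts, and derive fn by subtraction
-- (objective: alternative).

-- ===== PORT A =====
-- one loop iteration of A: the four-way branch updating (tp, fp, tn, fn)
def pvStepA (s : Int × Int × Int × Int) (pr : Int × Int) : Int × Int × Int × Int :=
  -- int(truth) / int(pred) on an int is the identity
  if pr.1 = 1 ∧ pr.2 = 1 then (s.1 + 1, s.2.1, s.2.2.1, s.2.2.2)
  else if pr.1 = 0 ∧ pr.2 = 1 then (s.1, s.2.1 + 1, s.2.2.1, s.2.2.2)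
  else if pr.1 = 0 ∧ pr.2 = 0 then (s.1, s.2.1, s.2.2.1 + 1, s.2.2.2)
  else (s.1, s.2.1, s.2.2.1, s.2.2.2 + 1)

def confusion_from_binary_py (y_true : List Int) (y_pred : List Int) : List (String × Int) :=
  let r := (y_true.zip y_pred).foldl pvStepA (0, 0, 0, 0)
  [("tp", r.1), ("fp", r.2.1), ("tn", r.2.2.1), ("fn", r.2.2.2)]

-- ===== PORT B =====
def confusion_from_binary_py_alt (y_true : List Int) (y_pred : List Int) : List (String × Int) :=
  -- pairs = [(int(t), int(p)) for t, p in zip(...)]; int() on an int is the identity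
  let pairs := y_true.zip y_pred
  let tp : Int := PySem.List.count pairs (1, 1)
  let fp : Int := PySem.List.count pairs (0, 1)
  let tn : Int := PySem.List.count pairs (0, 0)
  [("tp", tp), ("fp", fp), ("tn", tn), ("fn", (pairs.length : Int) - tp - fp - tn)]

-- ===== PRECONDITION & SPEC =====
def Spec_confusion_from_binary_py (y_true : List Int) (y_pred : List Int) (out : List (String × Int)) : Prop := out = confusion_from_binary_py_alt y_true y_pred
instance (y_true : List Int) (y_pred : List Int) (out : List (String × Int)) : Decidable (Spec_confusion_from_binary_py y_true y_pred out) := by unfold Spec_confusion_from_binary_py; infer_instance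

-- ===== CLAIM (what is proved, stated in full; the proofs are below) =====
def Claim_equal_confusion_from_binary_py : Prop := ∀ (y_true : List Int) (y_pred : List Int), Dom_confusion_from_binary_py y_true y_pred → Spec_confusion_from_binary_py y_true y_pred (confusion_from_binary_py y_true y_pred)

-- ===== LEMMAS AND PROOFS =====

-- loop invariant: A's fold adds the three counts and the remainder to the accumulator
lemma pvInv (l : List (Int × Int)) :
    ∀ (a b c d : Int),
      l.foldl pvStepA (a, b, c, d) =
        (a + l.count (1, 1),
         b + l.count (0, 1),
         c + l.count (0, 0),
         d + ((l.length : Int) - l.count (1, 1) - l.count (0, 1) - l.count (0, 0))) := by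
  induction l with
  | nil => intro a b c d; simp
  | cons pr rest ih =>
    intro a b c d
    simp only [List.foldl_cons, ih, List.length_cons, List.count_cons, pvStepA]
    by_cases hA : pr.1 = 1 ∧ pr.2 = 1
    · have hpr : pr = (1, 1) := Prod.ext hA.1 hA.2
      simp only [hpr]
      refine Prod.ext ?_ (Prod.ext ?_ (Prod.ext ?_ ?_)) <;> simp <;> try ring
    · by_cases hB : pr.1 = 0 ∧ pr.2 = 1
      · have hpr : pr = (0, 1) := Prod.ext hB.1 hB.2
        simp only [hpr]
        refine Prod.ext ?_ (Prod.ext ?_ (Prod.ext ?_ ?_)) <;> simp <;> try ring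
      · by_cases hC : pr.1 = 0 ∧ pr.2 = 0
        · have hpr : pr = (0, 0) := Prod.ext hC.1 hC.2
          simp only [hpr]
          refine Prod.ext ?_ (Prod.ext ?_ (Prod.ext ?_ ?_)) <;> simp <;> try ring
        · have h1 : pr ≠ (1, 1) := fun h => hA (by rw [h]; exact ⟨rfl, rfl⟩)
          have h2 : pr ≠ (0, 1) := fun h => hB (by rw [h]; exact ⟨rfl, rfl⟩)
          have h3 : pr ≠ (0, 0) := fun h => hC (by rw [h]; exact ⟨rfl, rfl⟩)
          simp only [if_neg hA, if_neg hB, if_neg hC]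
          refine Prod.ext ?_ (Prod.ext ?_ (Prod.ext ?_ ?_)) <;>
            simp [h1, h2, h3] <;> try ring

-- ===== VERDICT (by name: the statement is the Claim_ definition above) =====
theorem confusion_from_binary_py_spec : Claim_equal_confusion_from_binary_py := by
  intro y_true y_pred _
  unfold Spec_confusion_from_binary_py confusion_from_binary_py confusion_from_binary_py_alt
  simp only [pvInv, PySem.List.count_eq]
  norm_num
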